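-- pv_equiv track=rewrite | github.com/district-solutions/open-agent-tools-coder | oats/session/compaction.py | _build_file_state
-- ===== SOURCE A (Python) =====
-- def _build_file_state(events: list[tuple[str, str]]) -> list[tuple[str, str]]:
--     """Collapse per-file event streams into a final-state table.
--
--     Returns [(path, status)] where status is one of:
--     - 'modified'           : edited; prior reads (if any) are stale
--     - 'modified (re-read)' : edited, then re-read — in-memory content fresh
--     - 'read'               : read-only; no modifications seen
--
--     The goal is: at continuation time, the model should know which files
--     have been touched and whether its recollection of their contents is
--     still valid. Without this, a read earlier in the session gets
--     summarized identically whether or not an edit since invalidated it.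
--     """
--     if not events:
--         return []
--     per_file: dict[str, list[str]] = {}
--     for path, action in events:
--         per_file.setdefault(path, []).append(action)
--
--     out: list[tuple[str, str]] = []
--     for path, actions in per_file.items():
--         if "modified" not in actions:
--             out.append((path, "read"))
--             continue
--         last_mod = len(actions) - 1 - actions[::-1].index("modified")
--         # Any read after the last modification means the in-memory read is fresh.
--         if "read" in actions[last_mod + 1:]:
--             out.append((path, "modified (re-read)"))
--         else:
--             out.append((path, "modified"))
--     # Bound the output — 20 entries is plenty for any realistic session.
--     return out[:20]
-- ===== SOURCE B (Python) =====
-- def _build_file_state(events: list[tuple[str, str]]) -> list[tuple[str, str]]: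
--     # One streaming pass: per path keep (modified, read_after_mod) flags.
--     state: dict[str, tuple[bool, bool]] = {}
--     for path, action in events:
--         m, r = state.get(path, (False, False))
--         if action == "modified":
--             m, r = True, False
--         elif action == "read" and m:
--             r = True
--         state[path] = (m, r)
--     return [(p, "read" if not m else ("modified (re-read)" if r else "modified"))
--             for p, (m, r) in state.items()][:20]
-- ===== Notes on version B (the rewrite author's own statement) =====
-- stated objective: simpler
-- what changed: Single streaming pass keeping two boolean flags per path (modified, read-after-modification) in one dict, instead of grouping full per-file action lists and then re-scanning each with a reverse index and slice; truncation to 20 is kept.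
import Mathlib
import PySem

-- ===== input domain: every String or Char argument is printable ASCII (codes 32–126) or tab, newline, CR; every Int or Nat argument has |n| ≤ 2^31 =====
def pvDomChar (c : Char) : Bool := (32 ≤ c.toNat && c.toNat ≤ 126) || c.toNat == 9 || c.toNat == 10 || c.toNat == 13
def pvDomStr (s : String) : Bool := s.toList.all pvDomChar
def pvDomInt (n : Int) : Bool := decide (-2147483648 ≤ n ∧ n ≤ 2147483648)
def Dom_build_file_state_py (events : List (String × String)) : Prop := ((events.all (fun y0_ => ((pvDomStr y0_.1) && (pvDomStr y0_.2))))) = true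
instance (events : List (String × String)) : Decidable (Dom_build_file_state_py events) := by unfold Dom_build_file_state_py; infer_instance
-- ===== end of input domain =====

-- B replaces A's group-then-rescan (per-file action lists, reverse index, slices) by one
-- streaming pass keeping two boolean flags per path; objective: simpler.


-- ===== PORT A =====
-- body of A's second loop, per (path, actions) item
def pvStatusA (actions : List String) : String :=
  if actions.contains "modified" = false then "read"
  else
    -- actions[::-1]
    let rev := (PySem.List.slice? actions none none (-1)).getD []
    -- .index("modified"): in this branch "modified" ∈ actions, so index? is some (Python would raise otherwise)
    let last_mod : Int := PySem.List.len actions - 1 - (((PySem.List.index? rev "modified").getD 0 : Nat) : Int)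
    if (PySem.List.slice actions (some (last_mod + 1)) none).contains "read" = true
    then "modified (re-read)" else "modified"

def build_file_state_py (events : List (String × String)) : List (String × String) :=
  if events = [] then []
  else
    -- per_file.setdefault(path, []).append(action) ≡ per_file[path] = per_file.get(path, []) + [action]
    let per_file : PySem.Dict String (List String) :=
      events.foldl (fun d pa => d.modify pa.1 [] (· ++ [pa.2])) PySem.Dict.empty
    let out : List (String × String) :=
      per_file.items.foldl (fun out pr => out ++ [(pr.1, pvStatusA pr.2)]) []
    PySem.List.slice out none (some 20)

-- ===== PORT B =====
-- flag update for one event's action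
def pvStepB (mr : Bool × Bool) (a : String) : Bool × Bool :=
  if a = "modified" then (true, false)
  else if a = "read" ∧ mr.1 = true then (mr.1, true)
  else mr

def pvStatusB (mr : Bool × Bool) : String :=
  if mr.1 = false then "read"
  else if mr.2 = true then "modified (re-read)" else "modified"

def build_file_state_py_alt (events : List (String × String)) : List (String × String) :=
  let state : PySem.Dict String (Bool × Bool) :=
    events.foldl (fun d pa => d.insert pa.1 (pvStepB (d.getD pa.1 (false, false)) pa.2)) PySem.Dict.empty
  -- [:20] with a nonnegative bound = take 20
  (state.items.map (fun pr => (pr.1, pvStatusB pr.2))).take 20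

-- ===== PRECONDITION & SPEC =====
def Spec_build_file_state_py (events : List (String × String)) (out : List (String × String)) : Prop := out = build_file_state_py_alt events
instance (events : List (String × String)) (out : List (String × String)) : Decidable (Spec_build_file_state_py events out) := by unfold Spec_build_file_state_py; infer_instance

-- ===== CLAIM (what is proved, stated in full; the proofs are below) =====
def Claim_equal_build_file_state_py : Prop := ∀ (events : List (String × String)), Dom_build_file_state_py events → Spec_build_file_state_py events (build_file_state_py events)

-- ===== LEMMAS AND PROOFS =====

-- B's running flags as a function of A's collected action list
def pvF (acts : List String) : Bool × Bool := acts.foldl pvStepB (false, false)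

-- A's per-file dict, with every value pushed through pvF
def pvMap (d : PySem.Dict String (List String)) : PySem.Dict String (Bool × Bool) :=
  PySem.Dict.mk (d.items.map (fun p => (p.1, pvF p.2)))

theorem pv_get? (d : PySem.Dict String (List String)) (k : String) :
    (pvMap d).get? k = (d.get? k).map pvF := by
  simp [pvMap, PySem.Dict.get?, List.find?_map, Function.comp_def, Option.map_map]

theorem pv_contains (d : PySem.Dict String (List String)) (k : String) :
    (pvMap d).contains k = d.contains k := by
  simp [pvMap, PySem.Dict.contains, List.any_map, Function.comp_def]

theorem pv_getD (d : PySem.Dict String (List String)) (k : String) :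
    (pvMap d).getD k (false, false) = pvF (d.getD k []) := by
  simp only [PySem.Dict.getD, pv_get?]
  cases h : d.get? k <;> simp [pvF]

theorem pv_insert (d : PySem.Dict String (List String)) (k : String) (v : List String) :
    pvMap (d.insert k v) = (pvMap d).insert k (pvF v) := by
  simp only [PySem.Dict.insert, pv_contains]
  by_cases h : d.contains k = true
  · simp only [h, if_true, pvMap, List.map_map]
    congr 1
    apply List.map_congr_left
    intro p _
    by_cases hk : p.1 = k <;> simp [hk]
  · simp [h, pvMap]

theorem pvF_append (acts : List String) (a : String) :
    pvF (acts ++ [a]) = pvStepB (pvF acts) a := by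
  simp [pvF, List.foldl_append]

theorem pv_fold (events : List (String × String)) :
    ∀ d : PySem.Dict String (List String),
      events.foldl (fun d pa => d.insert pa.1 (pvStepB (d.getD pa.1 (false, false)) pa.2)) (pvMap d)
        = pvMap (events.foldl (fun d pa => d.modify pa.1 [] (· ++ [pa.2])) d) := by
  induction events with
  | nil => intro d; rfl
  | cons e es ih =>
      intro d
      simp only [List.foldl_cons, PySem.Dict.modify, pv_getD, ← pvF_append, ← pv_insert]
      exact ih _

theorem pvF_fst (acts : List String) :
    ∀ s : Bool × Bool, (acts.foldl pvStepB s).1 = (s.1 || acts.contains "modified") := by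
  induction acts with
  | nil => intro s; simp
  | cons a as ih =>
      intro s
      simp only [List.foldl_cons, List.contains_cons]
      by_cases hm : a = "modified"
      · subst hm; simp [pvStepB, ih]
      · by_cases hr : a = "read"
        · subst hr
          by_cases h1 : s.1 = true <;> simp [pvStepB, ih, h1, hm]
        · have hm' : ("modified" == a) = false := beq_eq_false_iff_ne.mpr (fun h => hm h.symm)
          simp [pvStepB, hm, hr, ih, hm']

theorem statusA_of_not_mod (acts : List String) (h : acts.contains "modified" = false) :
    pvStatusA acts = "read" := by
  unfold pvStatusA; rw [h]; rfl

theorem statusA_of_mod (acts : List String) (h : acts.contains "modified" = true) :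
    pvStatusA acts =
      (if (PySem.List.slice acts
            (some (PySem.List.len acts - 1 -
              (((PySem.List.index? ((PySem.List.slice? acts none none (-1)).getD []) "modified").getD 0 : Nat) : Int) + 1))
            none).contains "read" = true
       then "modified (re-read)" else "modified") := by
  unfold pvStatusA; rw [h]; rfl

theorem pv_status (acts : List String) : pvStatusA acts = pvStatusB (pvF acts) := by
  induction acts using List.reverseRecOn with
  | nil => rfl
  | append_singleton as a ih =>
      by_cases hm : a = "modified"
      · -- last element is a modification: suffix after it is empty
        subst hm
        have hc : (as ++ ["modified"]).contains "modified" = true := by simp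
        have hrev : (PySem.List.slice? (as ++ ["modified"]) none none (-1)).getD [] =
            "modified" :: as.reverse := by
          rw [PySem.List.slice?_none_none_neg_one]; simp
        have hB : pvF (as ++ ["modified"]) = (true, false) := by
          rw [pvF_append]; simp [pvStepB]
        rw [statusA_of_mod _ hc, hrev, PySem.List.index?_cons_self, hB]
        have hlen : (PySem.List.len (as ++ ["modified"]) - 1 - (((some (0:Nat)).getD 0 : Nat) : Int) + 1) =
            ((as.length + 1 : Nat) : Int) := by
          simp [PySem.List.len_eq]
        rw [hlen, PySem.List.slice_from_natCast]
        have hdrop : (as ++ ["modified"]).drop (as.length + 1) = [] := by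
          apply List.drop_eq_nil_of_le; simp
        rw [hdrop]
        simp [pvStatusB]
      · by_cases hmem : "modified" ∈ as
        · -- modification somewhere in as, last element is not one
          have hc : (as ++ [a]).contains "modified" = true := by simp [hmem]
          have hca : as.contains "modified" = true := by simp [hmem]
          obtain ⟨j, hj⟩ : ∃ j, PySem.List.index? as.reverse "modified" = some j := by
            have : "modified" ∈ as.reverse := by simpa using hmem
            exact Option.isSome_iff_exists.mp (by rw [PySem.List.index?_isSome_iff]; exact this)
          obtain ⟨hjlt, -, -⟩ := PySem.List.getElem_of_index?_eq_some hj
          rw [List.length_reverse] at hjlt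
          have hrev : (PySem.List.slice? (as ++ [a]) none none (-1)).getD [] =
              a :: as.reverse := by
            rw [PySem.List.slice?_none_none_neg_one]; simp
          have hrev' : (PySem.List.slice? as none none (-1)).getD [] = as.reverse := by
            rw [PySem.List.slice?_none_none_neg_one]; rfl
          have hidx : PySem.List.index? (a :: as.reverse) "modified" = some (j + 1) := by
            rw [PySem.List.index?_cons_of_ne as.reverse hm, hj]; rfl
          have harith : (PySem.List.len (as ++ [a]) - 1 - (((some (j+1)).getD 0 : Nat) : Int) + 1) =
              ((as.length - j : Nat) : Int) := by
            simp only [PySem.List.len_eq, List.length_append, List.length_cons,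
              List.length_nil, Option.getD_some]
            push_cast [Nat.cast_sub (le_of_lt hjlt)]
            ring
          have harith' : (PySem.List.len as - 1 - (((some j).getD 0 : Nat) : Int) + 1) =
              ((as.length - j : Nat) : Int) := by
            simp only [PySem.List.len_eq, Option.getD_some]
            push_cast [Nat.cast_sub (le_of_lt hjlt)]
            ring
          have hdrop : (as ++ [a]).drop (as.length - j) = as.drop (as.length - j) ++ [a] := by
            rw [List.drop_append_of_le_length (by omega)]
          rw [statusA_of_mod _ hc, hrev, hidx, harith, PySem.List.slice_from_natCast, hdrop]
          rw [statusA_of_mod _ hca, hrev', hj, harith', PySem.List.slice_from_natCast] at ih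
          by_cases hrd : a = "read"
          · -- a re-read after the last modification
            subst hrd
            have hfst : (pvF as).1 = true := by
              show (List.foldl pvStepB (false, false) as).1 = true
              rw [pvF_fst]; simp [hmem]
            rw [pvF_append]
            simp [pvStepB, hfst, pvStatusB]
          · -- an irrelevant action: both sides unchanged
            have hstep : pvF (as ++ [a]) = pvF as := by
              rw [pvF_append]; simp [pvStepB, hm, hrd]
            have hcc : (List.drop (as.length - j) as ++ [a]).contains "read"
                = (List.drop (as.length - j) as).contains "read" := by
              have hne : ¬ "read" = a := fun h => hrd h.symm
              simp [hne]
            rw [hstep, hcc, ih]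
        · -- no modification at all: both report "read"
          have hc : (as ++ [a]).contains "modified" = false := by
            simp only [List.contains_append, List.contains_cons, List.contains_nil,
              Bool.or_false, Bool.or_eq_false_iff]
            constructor
            · exact by simpa using hmem
            · exact beq_eq_false_iff_ne.mpr (fun h => hm h.symm)
          have hfst : (pvF (as ++ [a])).1 = false := by
            show (List.foldl pvStepB (false, false) (as ++ [a])).1 = false
            rw [pvF_fst]
            simp only [Bool.false_or]
            exact hc
          rw [statusA_of_not_mod _ hc]
          unfold pvStatusB
          rw [hfst]
          rfl

-- ===== VERDICT (by name: the statement is the Claim_ definition above) =====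
theorem build_file_state_py_spec : Claim_equal_build_file_state_py := by
  intro events _
  unfold Spec_build_file_state_py build_file_state_py build_file_state_py_alt
  by_cases h : events = []
  · subst h; rfl
  · simp only [h, if_false]
    have hstart : (PySem.Dict.empty : PySem.Dict String (Bool × Bool)) =
        pvMap PySem.Dict.empty := rfl
    rw [hstart, pv_fold]
    rw [PySem.List.foldl_append_singleton_eq_map, PySem.List.slice_to (b := 20) _ (by omega)]
    simp only [pvMap, List.map_map, List.nil_append]
    congr 1
    apply List.map_congr_left
    intro p _
    simp [pv_status]
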